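-- pv_equiv track=rewrite | github.com/Weber0906/DI_Bootcamp | Week2/Day4/daily-challeng-w2-d4.py | process_column
-- ===== SOURCE A (Python) =====
-- def process_column(column: list[str]) -> str:
--
--     message = ""
--     non_alpha = 0
--
--     for char in column:
--         if char.isalpha():
--             message += char
--             non_alpha = 0
--         else:
--             non_alpha += 1
--             if non_alpha == 2:
--                 message += ' '
--                 # non_alpha = 0
--
--     return message
-- ===== SOURCE B (Python) =====
-- def process_column(column: list[str]) -> str:
--     # run-based: split into maximal runs of alpha / non-alpha elements;
--     # alpha runs are kept verbatim, a non-alpha run of length >= 2 becomes one space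
--     parts = []
--     i = 0
--     n = len(column)
--     while i < n:
--         flag = column[i].isalpha()
--         j = i
--         while j < n and column[j].isalpha() == flag:
--             j += 1
--         if flag:
--             parts.extend(column[i:j])
--         elif j - i >= 2:
--             parts.append(' ')
--         i = j
--     return ''.join(parts)
-- ===== Notes on version B (the rewrite author's own statement) =====
-- stated objective: alternative
-- what changed: Replaces the per-character counter-state loop by a run decomposition: the list is split into maximal runs of alpha/non-alpha elements, alpha runs are emitted verbatim and a non-alpha run contributes one space iff its length is >= 2, pieces joined at the end.
import Mathlib
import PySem

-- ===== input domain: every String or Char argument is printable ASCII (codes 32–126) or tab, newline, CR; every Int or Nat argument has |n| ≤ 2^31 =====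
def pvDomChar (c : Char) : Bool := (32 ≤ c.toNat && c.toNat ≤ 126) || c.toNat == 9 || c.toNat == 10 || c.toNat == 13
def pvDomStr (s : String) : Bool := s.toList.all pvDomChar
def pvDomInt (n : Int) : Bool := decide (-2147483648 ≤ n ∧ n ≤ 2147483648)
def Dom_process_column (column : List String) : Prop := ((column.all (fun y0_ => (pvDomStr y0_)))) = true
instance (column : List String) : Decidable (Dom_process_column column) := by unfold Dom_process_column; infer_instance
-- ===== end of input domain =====

-- B replaces A's per-character counter-state loop by a run decomposition (alpha runs kept
-- verbatim, a non-alpha run of length ≥ 2 becomes one space); objective: alternative.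

-- ===== PORT A =====
-- one step of A's for-loop body on the state (message, non_alpha)
def stepA (st : String × Int) (char : String) : String × Int :=
  if PySem.Str.strIsalpha char then (st.1 ++ char, 0)
  else
    let na := st.2 + 1
    if na = 2 then (st.1 ++ " ", na) else (st.1, na)

def process_column (column : List String) : String :=
  (column.foldl stepA ("", 0)).1

-- ===== PORT B =====
-- the run decomposition of Source B's outer while loop: one maximal run per step
def altRuns : List String → List String
  | [] => []
  | c :: rest =>
    let flag := PySem.Str.strIsalpha c
    let run := (c :: rest).takeWhile (fun x => PySem.Str.strIsalpha x == flag)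
    let rest' := (c :: rest).dropWhile (fun x => PySem.Str.strIsalpha x == flag)
    (if flag then run else if 2 ≤ run.length then [" "] else []) ++ altRuns rest'
termination_by l => l.length
decreasing_by
  simp only [List.dropWhile_cons, beq_self_eq_true, if_true, List.length_cons]
  exact Nat.lt_succ_of_le (List.length_dropWhile_le _ rest)

def process_column_alt (column : List String) : String :=
  PySem.Str.join "" (altRuns column)

-- ===== PRECONDITION & SPEC =====
def Spec_process_column (column : List String) (out : String) : Prop := out = process_column_alt column
instance (column : List String) (out : String) : Decidable (Spec_process_column column out) := by unfold Spec_process_column; infer_instance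

-- ===== CLAIM (what is proved, stated in full; the proofs are below) =====
def Claim_equal_process_column : Prop := ∀ (column : List String), Dom_process_column column → Spec_process_column column (process_column column)

-- ===== LEMMAS AND PROOFS =====

def emitA (c : String) (na : Int) : String :=
  if PySem.Str.strIsalpha c then c else if na + 1 = 2 then " " else ""
def nextA (c : String) (na : Int) : Int :=
  if PySem.Str.strIsalpha c then 0 else na + 1

theorem stepA_eq (m : String) (na : Int) (c : String) :
    stepA (m, na) c = (m ++ emitA c na, nextA c na) := by
  simp only [stepA, emitA, nextA]
  split_ifs <;> simp

theorem join_empty_nil : PySem.Str.join "" ([] : List String) = "" := by decide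

theorem join_empty_cons (x : String) (xs : List String) :
    PySem.Str.join "" (x :: xs) = x ++ PySem.Str.join "" xs := by
  apply String.toList_inj.mp
  cases xs <;> simp [PySem.Str.join, PySem.Chars.join, List.intercalate]

theorem join_empty_append (a b : List String) :
    PySem.Str.join "" (a ++ b) = PySem.Str.join "" a ++ PySem.Str.join "" b := by
  induction a with
  | nil => simp [join_empty_nil]
  | cons x t ih => simp [join_empty_cons, ih, String.append_assoc]

-- the message component of A's state is only ever appended to
theorem foldl_stepA_prefix (l : List String) (m : String) (na : Int) :
    (l.foldl stepA (m, na)).1 = m ++ (l.foldl stepA ("", na)).1 := by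
  induction l generalizing m na with
  | nil => simp
  | cons c t ih =>
    simp only [List.foldl_cons, stepA_eq]
    rw [ih (m ++ emitA c na), ih ("" ++ emitA c na)]
    simp [String.append_assoc]

-- A's loop over a run of alpha elements appends the run and resets the counter
theorem foldl_stepA_alpha (run : List String) (m : String) (na : Int)
    (h : ∀ x ∈ run, PySem.Str.strIsalpha x = true) :
    run.foldl stepA (m, na) = (m ++ PySem.Str.join "" run, if run.isEmpty then na else 0) := by
  induction run generalizing m na with
  | nil => simp [join_empty_nil]
  | cons c t ih =>
    have hc : PySem.Str.strIsalpha c = true := h c (by simp)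
    simp only [List.foldl_cons, stepA, hc, if_true]
    rw [ih _ _ (fun x hx => h x (by simp [hx]))]
    cases t <;> simp [join_empty_cons, join_empty_nil, String.append_assoc]

-- A's loop over a run of non-alpha elements: one space iff the counter crosses 2
theorem foldl_stepA_nonalpha (run : List String) (m : String) (k : Int) (hk : 0 ≤ k)
    (h : ∀ x ∈ run, PySem.Str.strIsalpha x = false) :
    run.foldl stepA (m, k) =
      (m ++ (if k < 2 ∧ 2 ≤ k + run.length then " " else ""), k + run.length) := by
  induction run generalizing m k with
  | nil =>
    simp only [List.foldl_nil, List.length_nil, Nat.cast_zero]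
    rw [if_neg (by omega)]
    simp
  | cons c t ih =>
    have hc : PySem.Str.strIsalpha c = false := h c (by simp)
    simp only [List.foldl_cons, stepA_eq, emitA, nextA, hc, Bool.false_eq_true, if_false]
    rw [ih _ _ (by omega) (fun x hx => h x (by simp [hx]))]
    simp only [Prod.mk.injEq, List.length_cons]
    refine ⟨?_, by push_cast; omega⟩
    by_cases h2 : k + 1 = 2
    · rw [if_pos h2, if_neg (by omega), if_pos (by constructor <;> omega)]
      simp
    · rw [if_neg h2]
      by_cases h3 : k + 1 < 2 ∧ 2 ≤ k + 1 + (t.length : Int)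
      · rw [if_pos h3, if_pos (by push_cast at h3 ⊢; omega)]
        simp
      · rw [if_neg h3, if_neg (by push_cast at h3 ⊢; omega)]
        simp

-- after a non-alpha run the next element (if any) is alpha, so the leftover counter is irrelevant
theorem foldl_stepA_reset (l : List String) (k : Int)
    (h : l = [] ∨ ∃ c t, l = c :: t ∧ PySem.Str.strIsalpha c = true) :
    (l.foldl stepA ("", k)).1 = (l.foldl stepA ("", 0)).1 := by
  rcases h with h | ⟨c, t, rfl, hc⟩
  · subst h; rfl
  · have hc' : PySem.Chars.strIsalpha c.toList = true := by simpa using hc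
    simp [stepA_eq, emitA, nextA, hc']

-- main invariant: A's loop from the initial state computes B's joined runs
theorem main_eq : ∀ (n : Nat) (l : List String), l.length ≤ n →
    (l.foldl stepA ("", 0)).1 = PySem.Str.join "" (altRuns l) := by
  intro n
  induction n with
  | zero =>
    intro l hl
    have : l = [] := List.eq_nil_of_length_eq_zero (Nat.le_zero.mp hl)
    subst this
    simp [altRuns, join_empty_nil]
  | succ n ih =>
    intro l hl
    match l with
    | [] => simp [altRuns, join_empty_nil]
    | c :: rest =>
      set p : String → Bool := fun x => PySem.Str.strIsalpha x == PySem.Str.strIsalpha c with hp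
      have hsplit : (c :: rest).takeWhile p ++ (c :: rest).dropWhile p = c :: rest :=
        List.takeWhile_append_dropWhile
      have hrunmem : ∀ x ∈ (c :: rest).takeWhile p,
          PySem.Str.strIsalpha x = PySem.Str.strIsalpha c := by
        intro x hx
        have := List.mem_takeWhile_imp hx
        simpa [hp] using this
      have hrun_ne : (c :: rest).takeWhile p ≠ [] := by
        simp [hp]
      have hlen : ((c :: rest).dropWhile p).length < (c :: rest).length := by
        have := congrArg List.length hsplit
        simp only [List.length_append] at this
        have h1 : 0 < ((c :: rest).takeWhile p).length := List.length_pos_iff.mpr hrun_ne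
        omega
      have hdrop : (c :: rest).dropWhile p = [] ∨
          ∃ h' t', (c :: rest).dropWhile p = h' :: t' ∧ p h' = false := by
        cases hd : (c :: rest).dropWhile p with
        | nil => exact Or.inl rfl
        | cons h' t' =>
          refine Or.inr ⟨h', t', rfl, ?_⟩
          have := List.head_dropWhile_not p (l := c :: rest) (by simp [hd])
          simpa [hd] using this
      have ihrest := ih ((c :: rest).dropWhile p) (by omega)
      have halt : altRuns (c :: rest) =
          (if PySem.Str.strIsalpha c then (c :: rest).takeWhile p
           else if 2 ≤ ((c :: rest).takeWhile p).length then [" "] else []) ++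
          altRuns ((c :: rest).dropWhile p) := by
        rw [altRuns]
      conv_lhs => rw [← hsplit]
      rw [List.foldl_append]
      by_cases hflag : PySem.Str.strIsalpha c = true
      · have hall : ∀ x ∈ (c :: rest).takeWhile p, PySem.Str.strIsalpha x = true := by
          intro x hx; rw [hrunmem x hx, hflag]
        rw [foldl_stepA_alpha _ _ _ hall]
        have hne : ((c :: rest).takeWhile p).isEmpty = false := by
          simp [hrun_ne]
        rw [hne]
        simp only [Bool.false_eq_true, if_false]
        rw [foldl_stepA_prefix, ihrest, halt, hflag, if_pos rfl, join_empty_append]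
        simp
      · have hfl : PySem.Str.strIsalpha c = false := by
          cases hx : PySem.Str.strIsalpha c
          · rfl
          · exact absurd hx hflag
        have hall : ∀ x ∈ (c :: rest).takeWhile p, PySem.Str.strIsalpha x = false := by
          intro x hx; rw [hrunmem x hx, hfl]
        rw [foldl_stepA_nonalpha _ _ 0 (le_refl 0) hall]
        rw [foldl_stepA_prefix]
        rw [foldl_stepA_reset _ _ ?hnext]
        case hnext =>
          rcases hdrop with hd | ⟨h', t', hd, hph⟩
          · exact Or.inl hd
          · refine Or.inr ⟨h', t', hd, ?_⟩
            have : ¬ (PySem.Str.strIsalpha h' = PySem.Str.strIsalpha c) := by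
              simpa [hp] using hph
            cases hy : PySem.Str.strIsalpha h'
            · exact absurd (by rw [hy, hfl]) this
            · rfl
        rw [ihrest, halt, hfl]
        simp only [Bool.false_eq_true, if_false]
        rw [join_empty_append]
        split_ifs with hA hB hB
        · rw [join_empty_cons, join_empty_nil]
          simp
        · exact absurd (by omega : 2 ≤ ((c :: rest).takeWhile p).length) hB
        · exact absurd (by constructor <;> omega) hA
        · rw [join_empty_nil]
          simp

-- ===== VERDICT (by name: the statement is the Claim_ definition above) =====
theorem process_column_spec : Claim_equal_process_column := by
  intro column _
  unfold Spec_process_column process_column process_column_alt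
  exact main_eq column.length column (le_refl _)
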